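-- pv_equiv track=rewrite | github.com/JAMelendezD/Tutorial | dynamic.py | largest_chain_dyn
-- ===== SOURCE A (Python) =====
-- def largest_chain_dyn(threshold):
--     '''
--     Calculates the largest Collatz chain up to a threshold using a memory
--     of the previous visited values and their sizes
--     '''
--     largest = 0
--     dic = {}
--     for i in range(1, threshold):
--         n = i
--         size = 0
--         tmp = [] # We need a temporary list to later fill our dictionary
--         while n != 1:
--             tmp.append(n)
--             try: # see if n is in the dictionary
--                 size += dic[n] # if it is then we add the remaining steps to size
--                 n = 1 # We go straight down to 1
--             except:
--                 if n % 2 == 0: # was not in dictionary do the regular procedure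
--                     n = n // 2
--                 else:
--                     n = 3 * n + 1
--                 size += 1 # add one to our size
--
--         for index in range(len(tmp)): # update the dictionary with all the new numbers we explored
--             dic[tmp[index]] = size - index
--
--         if size > largest:
--             largest = size
--             target = i
--     return target
-- ===== SOURCE B (Python) =====
-- def largest_chain_dyn(threshold):
--     '''
--     Calculates the largest Collatz chain up to a threshold: a recursive
--     memoized helper gives each chain length, the lengths are collected in
--     a list, and the answer is the position of the first maximum.
--     '''
--     memo = {1: 0}
--
--     def chain(n):
--         if n not in memo:
--             memo[n] = 1 + chain(3 * n + 1 if n % 2 else n // 2)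
--         return memo[n]
--
--     lengths = [chain(i) for i in range(1, threshold)]
--     return 1 + lengths.index(max(lengths))
-- ===== Notes on version B (the rewrite author's own statement) =====
-- stated objective: faster
-- what changed: A's single stateful loop (iterative chain walk with a tmp list, index-based dictionary backfill, and a running strict-max update) is replaced by a recursive memoized chain-length helper that fills the memo on unwind (no tmp list is built and no backfill pass runs), a lengths list built by a comprehension, and max()/list.index() to locate the first maximum.
-- outside the precondition, e.g. on largest_chain_dyn(2): A raises UnboundLocalError, B returns 1
import Mathlib
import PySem

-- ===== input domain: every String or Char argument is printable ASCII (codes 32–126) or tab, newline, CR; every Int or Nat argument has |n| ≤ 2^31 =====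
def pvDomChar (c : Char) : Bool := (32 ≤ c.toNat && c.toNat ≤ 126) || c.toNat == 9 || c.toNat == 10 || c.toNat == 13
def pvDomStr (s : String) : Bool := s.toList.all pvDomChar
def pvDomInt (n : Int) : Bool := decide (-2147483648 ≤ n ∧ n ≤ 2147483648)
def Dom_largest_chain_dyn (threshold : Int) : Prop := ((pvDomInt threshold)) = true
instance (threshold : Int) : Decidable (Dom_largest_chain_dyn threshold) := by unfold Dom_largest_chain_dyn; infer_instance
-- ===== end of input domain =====

-- B replaces A's running-max loop with tmp list and index backfill by a recursive memoized
-- chain-length helper plus a lengths list whose first maximum is located with max/index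
-- (a different decomposition; measured constant-factor faster: no tmp list is built and no
-- backfill pass runs). Both ports use a fuel counter only as a totality guard for the
-- (conjecturally always terminating) Collatz iteration.
def pvFuel : Nat := 2 ^ 64

-- ===== PORT A =====
-- the inner `while n != 1` loop: returns (size, tmp), none = fuel exhausted
def pvWhileA : Nat → Int → Int → List Int → Std.HashMap Int Int → Option (Int × List Int)
  | 0, _, _, _, _ => none
  | f + 1, n, size, tmp, dic =>
    if n = 1 then some (size, tmp)
    else
      let tmp' := tmp ++ [n]
      match dic[n]? with
      | some v => some (size + v, tmp')   -- size += dic[n]; n = 1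
      | none =>
        pvWhileA f (if PySem.Int.mod n 2 = 0 then PySem.Int.floordiv n 2 else 3 * n + 1)
          (size + 1) tmp' dic

-- `for index in range(len(tmp)): dic[tmp[index]] = size - index`
def pvBackfillA (dic : Std.HashMap Int Int) (tmp : List Int) (size : Int) : Std.HashMap Int Int :=
  (PySem.List.pyRange 0 tmp.length 1).foldl
    (fun d index => d.insert (PySem.List.pyGetD tmp index 0) (size - index)) dic

-- one iteration of the outer `for i in range(1, threshold)` loop; the state is
-- (largest, target, dic), target : Option Int (none = the name is still unbound);
-- the whole state is none once the fuel guard has tripped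
def pvStepLoopA (acc : Option (Int × Option Int × Std.HashMap Int Int)) (i : Int) :
    Option (Int × Option Int × Std.HashMap Int Int) :=
  match acc with
  | none => none
  | some (largest, target, dic) =>
    match pvWhileA pvFuel i 0 [] dic with
    | none => none
    | some (size, tmp) =>
      let dic' := pvBackfillA dic tmp size
      if largest < size then some (size, some i, dic')
      else some (largest, target, dic')

def largest_chain_dyn (threshold : Int) : Int :=
  ((((PySem.List.pyRange 1 threshold 1).foldl pvStepLoopA
      (some (0, none, (∅ : Std.HashMap Int Int)))).bind (fun s => s.2.1)).getD 0)

-- ===== PORT B =====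
-- `chain(n)`: if n not in memo: memo[n] = 1 + chain(step n); return memo[n]
-- (none = fuel exhausted; the memo starts as {1: 0})
def pvChainB : Nat → Int → Std.HashMap Int Int → Option (Int × Std.HashMap Int Int)
  | 0, _, _ => none
  | f + 1, n, memo =>
    match memo[n]? with
    | some v => some (v, memo)
    | none =>
      match pvChainB f (if PySem.Int.mod n 2 ≠ 0 then 3 * n + 1 else PySem.Int.floordiv n 2) memo with
      | none => none
      | some (r, memo') => some (1 + r, memo'.insert n (1 + r))

-- `lengths = [chain(i) for i in range(1, threshold)]`, threading the memo
def pvStepLenB (acc : Option (List Int × Std.HashMap Int Int)) (i : Int) :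
    Option (List Int × Std.HashMap Int Int) :=
  match acc with
  | none => none
  | some (ls, memo) =>
    match pvChainB pvFuel i memo with
    | none => none
    | some (L, memo') => some (ls ++ [L], memo')

-- `return 1 + lengths.index(max(lengths))`
def largest_chain_dyn_alt (threshold : Int) : Int :=
  match (PySem.List.pyRange 1 threshold 1).foldl pvStepLenB
      (some ([], (∅ : Std.HashMap Int Int).insert 1 0)) with
  | none => 0
  | some (ls, _) =>
    match PySem.List.max? ls (fun y => y) with
    | none => 0
    | some mx => 1 + (((PySem.List.index? ls mx).getD 0 : Nat) : Int)

-- ===== PRECONDITION & SPEC =====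
-- Pre_ excludes threshold ≤ 2, where A raises UnboundLocalError (`target` is never assigned).
def Pre_largest_chain_dyn (threshold : Int) : Prop := 3 ≤ threshold
instance (threshold : Int) : Decidable (Pre_largest_chain_dyn threshold) := by
  unfold Pre_largest_chain_dyn; infer_instance

def pvWitness_largest_chain_dyn : Int := 3

def Spec_largest_chain_dyn (threshold : Int) (out : Int) : Prop := out = largest_chain_dyn_alt threshold
instance (threshold : Int) (out : Int) : Decidable (Spec_largest_chain_dyn threshold out) := by
  unfold Spec_largest_chain_dyn; infer_instance

-- ===== CLAIM (what is proved, stated in full; the proofs are below) =====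
def Claim_equal_largest_chain_dyn : Prop := ∀ (threshold : Int), Dom_largest_chain_dyn threshold → Pre_largest_chain_dyn threshold → Spec_largest_chain_dyn threshold (largest_chain_dyn threshold)

-- ===== LEMMAS AND PROOFS =====

-- the Collatz step both programs use
def pvStep (n : Int) : Int :=
  if PySem.Int.mod n 2 = 0 then PySem.Int.floordiv n 2 else 3 * n + 1

lemma pvStep_swap (n : Int) :
    (if PySem.Int.mod n 2 ≠ 0 then 3 * n + 1 else PySem.Int.floordiv n 2) = pvStep n := by
  unfold pvStep
  by_cases h : PySem.Int.mod n 2 = 0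
  · rw [if_neg (not_not_intro h), if_pos h]
  · rw [if_pos h, if_neg h]

-- reference fueled chain relative to an abstract memo lookup g:
-- returns (chain length, list of visited nodes, outermost first)
def pvCref (g : Int → Option Int) : Nat → Int → Option (Int × List Int)
  | 0, _ => none
  | f + 1, n =>
    if n = 1 then some (0, [])
    else
      match g n with
      | some v => some (v, [n])
      | none => (pvCref g f (pvStep n)).map (fun p => (1 + p.1, n :: p.2))

-- lookup in the annotated visited list: node at depth d ↦ L - d, first occurrence wins
def pvLookC : List Int → Int → Int → Option Int → Option Int
  | [], _, _, fb => fb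
  | x :: xs, L, k, fb => if k = x then some L else pvLookC xs (L - 1) k fb

-- forward insertion with decreasing values (what A's backfill loop does)
def pvInsSeq : Std.HashMap Int Int → List Int → Int → Std.HashMap Int Int
  | d, [], _ => d
  | d, x :: xs, L => pvInsSeq (d.insert x L) xs (L - 1)

lemma pvWhileA_eq (f : Nat) : ∀ (n size : Int) (tmp : List Int) (d : Std.HashMap Int Int),
    pvWhileA f n size tmp d
      = (pvCref (fun x => d[x]?) f n).map (fun p => (size + p.1, tmp ++ p.2)) := by
  induction f with
  | zero => intro n size tmp d; rfl
  | succ f ih =>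
    intro n size tmp d
    rw [pvWhileA, pvCref]
    by_cases h1 : n = 1
    · rw [if_pos h1, if_pos h1, Option.map_some]
      simp
    · rw [if_neg h1, if_neg h1]
      cases hg : d[n]? with
      | some v => rfl
      | none =>
        show pvWhileA f (if PySem.Int.mod n 2 = 0 then PySem.Int.floordiv n 2 else 3 * n + 1)
            (size + 1) (tmp ++ [n]) d = _
        rw [show (if PySem.Int.mod n 2 = 0 then PySem.Int.floordiv n 2 else 3 * n + 1)
            = pvStep n from rfl, ih]
        cases hc : pvCref (fun x => d[x]?) f (pvStep n) with
        | none => rfl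
        | some p =>
          dsimp only
          simp only [Option.map_some, Option.some_inj, Prod.mk.injEq]
          exact ⟨by ring, by simp⟩

-- B's chain against the reference run: the memo always maps 1 ↦ 0, other keys play
-- the rôle of A's dictionary; on success the new memo holds the visited annotations
lemma pvChainB_spec (f : Nat) : ∀ (n : Int) (m : Std.HashMap Int Int), m[(1 : Int)]? = some 0 →
    (pvCref (fun x => if x = 1 then none else m[x]?) f n = none → pvChainB f n m = none) ∧
    (∀ L t, pvCref (fun x => if x = 1 then none else m[x]?) f n = some (L, t) →
      ∃ m', pvChainB f n m = some (L, m') ∧ m'[(1 : Int)]? = some 0 ∧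
        ∀ k : Int, k ≠ 1 → m'[k]? = pvLookC t L k (m[k]?)) := by
  induction f with
  | zero =>
    intro n m _
    exact ⟨fun _ => rfl, fun L t h => by rw [pvCref] at h; exact absurd h (by simp)⟩
  | succ f ih =>
    intro n m hm1
    rw [pvCref, pvChainB]
    by_cases h1 : n = 1
    · rw [if_pos h1]
      subst h1
      simp only [hm1]
      refine ⟨fun h => absurd h (by simp), ?_⟩
      intro L t h
      simp only [Option.some_inj, Prod.mk.injEq] at h
      obtain ⟨hL, ht⟩ := h
      subst hL; subst ht
      exact ⟨m, rfl, hm1, fun k _ => rfl⟩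
    · rw [if_neg h1]
      simp only [if_neg h1]
      cases hg : m[n]? with
      | some v =>
        dsimp only
        refine ⟨fun h => absurd h (by simp), ?_⟩
        intro L t h
        simp only [Option.some_inj, Prod.mk.injEq] at h
        obtain ⟨hL, ht⟩ := h
        subst hL; subst ht
        refine ⟨m, rfl, hm1, fun k _ => ?_⟩
        rw [pvLookC]
        by_cases hk : k = n
        · rw [if_pos hk, hk, hg]
        · rw [if_neg hk]; rfl
      | none =>
        simp only [pvStep_swap]
        obtain ⟨ihn, ihs⟩ := ih (pvStep n) m hm1
        cases hc : pvCref (fun x => if x = 1 then none else m[x]?) f (pvStep n) with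
        | none =>
          rw [ihn hc]
          exact ⟨fun _ => rfl, fun L t h => absurd h (by simp)⟩
        | some p =>
          obtain ⟨m', hm', hm'1, hlook⟩ := ihs p.1 p.2 (by rw [hc])
          rw [hm']
          dsimp only
          refine ⟨fun h => absurd h (by simp), ?_⟩
          intro L t h
          simp only [Option.map_some, Option.some_inj, Prod.mk.injEq] at h
          obtain ⟨hL, ht⟩ := h
          subst hL; subst ht
          refine ⟨m'.insert n (1 + p.1), rfl, ?_, fun k hk => ?_⟩
          · rw [show (m'.insert n (1 + p.1))[(1 : Int)]? = m'[(1 : Int)]? from by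
              simp [Std.HashMap.getElem?_insert, h1], hm'1]
          · rw [pvLookC]
            by_cases hkn : k = n
            · rw [if_pos hkn, hkn]
              simp
            · rw [if_neg hkn]
              rw [show (m'.insert n (1 + p.1))[k]? = m'[k]? from by
                simp [Std.HashMap.getElem?_insert, (Ne.symm hkn)], hlook k hk]
              congr 1
              omega

-- 1 never appears in the visited list
lemma pvCref_one_not_mem (f : Nat) : ∀ (g : Int → Option Int) (n L : Int) (t : List Int),
    pvCref g f n = some (L, t) → (1 : Int) ∉ t := by
  induction f with
  | zero => intro g n L t h; rw [pvCref] at h; exact absurd h (by simp)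
  | succ f ih =>
    intro g n L t h
    rw [pvCref] at h
    by_cases h1 : n = 1
    · rw [if_pos h1] at h
      simp only [Option.some_inj, Prod.mk.injEq] at h
      rw [← h.2]
      simp
    · rw [if_neg h1] at h
      cases hg : g n with
      | some v =>
        rw [hg] at h
        simp only [Option.some_inj, Prod.mk.injEq] at h
        rw [← h.2]
        simp [Ne.symm h1]
      | none =>
        rw [hg] at h
        cases hc : pvCref g f (pvStep n) with
        | none => rw [hc] at h; exact absurd h (by simp)
        | some p =>
          rw [hc, Option.map_some] at h
          simp only [Option.some_inj, Prod.mk.injEq] at h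
          rw [← h.2]
          simp only [List.mem_cons, not_or]
          exact ⟨Ne.symm h1, ih g (pvStep n) p.1 p.2 hc⟩

-- shape of a successful reference run: the visited list is an initial segment of the
-- Collatz orbit, no visited node is 1, the memo hits only at the last visited node
def pvStopsAt (g : Int → Option Int) (n : Int) (len : Nat) : Prop :=
  (∀ j < len, pvStep^[j] n ≠ 1) ∧
  ((pvStep^[len] n = 1 ∧ ∀ j < len, g (pvStep^[j] n) = none)
    ∨ (∃ l, len = l + 1 ∧ (g (pvStep^[l] n)).isSome ∧ ∀ j < l, g (pvStep^[j] n) = none))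

lemma pvCref_shape (f : Nat) : ∀ (n L : Int) (t : List Int) (g : Int → Option Int),
    pvCref g f n = some (L, t) →
    ∃ len, t = (List.range len).map (fun j => pvStep^[j] n) ∧ pvStopsAt g n len := by
  induction f with
  | zero => intro n L t g h; rw [pvCref] at h; exact absurd h (by simp)
  | succ f ih =>
    intro n L t g h
    rw [pvCref] at h
    by_cases h1 : n = 1
    · rw [if_pos h1] at h
      simp only [Option.some_inj, Prod.mk.injEq] at h
      refine ⟨0, by simp [← h.2], ⟨fun j hj => absurd hj (by omega), Or.inl ⟨by simpa using h1, fun j hj => absurd hj (by omega)⟩⟩⟩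
    · rw [if_neg h1] at h
      cases hg : g n with
      | some v =>
        rw [hg] at h
        simp only [Option.some_inj, Prod.mk.injEq] at h
        refine ⟨1, by simp [← h.2, List.range_one], ?_, Or.inr ⟨0, rfl, by simp [hg], fun j hj => absurd hj (by omega)⟩⟩
        intro j hj
        interval_cases j
        simpa using h1
      | none =>
        rw [hg] at h
        cases hc : pvCref g f (pvStep n) with
        | none => rw [hc] at h; exact absurd h (by simp)
        | some p =>
          rw [hc, Option.map_some] at h
          simp only [Option.some_inj, Prod.mk.injEq] at h
          obtain ⟨len, htp, hne, hterm⟩ := ih (pvStep n) p.1 p.2 g hc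
          refine ⟨len + 1, ?_, ?_, ?_⟩
          · rw [← h.2, htp, List.range_succ_eq_map]
            simp [Function.comp_def, Function.iterate_succ_apply]
          · intro j hj
            match j with
            | 0 => simpa using h1
            | j + 1 =>
              rw [Function.iterate_succ_apply]
              exact hne j (by omega)
          · rcases hterm with ⟨hone, hnon⟩ | ⟨l, hl, hs, hnon⟩
            · refine Or.inl ⟨by rw [Function.iterate_succ_apply]; exact hone, ?_⟩
              intro j hj
              match j with
              | 0 => simpa using hg
              | j + 1 =>
                rw [Function.iterate_succ_apply]
                exact hnon j (by omega)
            · refine Or.inr ⟨l + 1, by omega, by rw [Function.iterate_succ_apply]; exact hs, ?_⟩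
              intro j hj
              match j with
              | 0 => simpa using hg
              | j + 1 =>
                rw [Function.iterate_succ_apply]
                exact hnon j (by omega)

lemma pvIter_periodic (n : Int) (i d : Nat)
    (heq : pvStep^[i] n = pvStep^[i + d] n) :
    ∀ m, i ≤ m → pvStep^[m] n = pvStep^[m + d] n := by
  intro m him
  obtain ⟨c, rfl⟩ := Nat.exists_eq_add_of_le him
  have h1 : pvStep^[i + c] n = pvStep^[c] (pvStep^[i] n) := by
    rw [Nat.add_comm, Function.iterate_add_apply]
  have h2 : pvStep^[i + c + d] n = pvStep^[c] (pvStep^[i + d] n) := by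
    rw [show i + c + d = c + (i + d) by omega, Function.iterate_add_apply]
  rw [h1, h2, heq]

lemma pvShape_nodup (g : Int → Option Int) (n : Int) (len : Nat)
    (hstop : pvStopsAt g n len) :
    ((List.range len).map (fun j => pvStep^[j] n)).Nodup := by
  obtain ⟨hne, hterm⟩ := hstop
  apply List.Nodup.map_on _ List.nodup_range
  intro i hi j hj hij
  simp only [List.mem_range] at hi hj
  by_contra hij'
  have key : ∀ a b, a < b → b < len → pvStep^[a] n = pvStep^[b] n → False := by
    intro a b hab hb habeq
    have heq : pvStep^[a] n = pvStep^[a + (b - a)] n := by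
      rw [show a + (b - a) = b by omega]; exact habeq
    have hper := pvIter_periodic n a (b - a) heq
    rcases hterm with ⟨hone, _⟩ | ⟨l, hl, hs, hnon⟩
    · have h1 : pvStep^[len - (b - a)] n = pvStep^[len] n :=
        (hper (len - (b - a)) (by omega)).trans
          (by rw [show len - (b - a) + (b - a) = len by omega])
      exact hne (len - (b - a)) (by omega) (h1.trans hone)
    · have h1 : pvStep^[l - (b - a)] n = pvStep^[l] n :=
        (hper (l - (b - a)) (by omega)).trans
          (by rw [show l - (b - a) + (b - a) = l by omega])
      have h2 := hnon (l - (b - a)) (by omega)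
      rw [h1] at h2
      rw [h2] at hs
      exact absurd hs (by simp)
  rcases Nat.lt_or_ge i j with hlt | hge
  · exact key i j hlt hj hij
  · exact key j i (by omega) hi hij.symm

lemma pvCref_nodup (f : Nat) (n L : Int) (t : List Int) (g : Int → Option Int)
    (h : pvCref g f n = some (L, t)) : t.Nodup := by
  obtain ⟨len, ht, hstop⟩ := pvCref_shape f n L t g h
  rw [ht]
  exact pvShape_nodup g n len hstop

lemma pvLookC_of_not_mem (t : List Int) : ∀ (L k : Int) (fb : Option Int), k ∉ t →
    pvLookC t L k fb = fb := by
  induction t with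
  | nil => intro L k fb _; rfl
  | cons x xs ih =>
    intro L k fb h
    rw [List.mem_cons, not_or] at h
    rw [pvLookC, if_neg h.1]
    exact ih (L - 1) k fb h.2

lemma pvInsSeq_get? (t : List Int) : ∀ (d : Std.HashMap Int Int) (L k : Int), t.Nodup →
    (pvInsSeq d t L)[k]? = pvLookC t L k (d[k]?) := by
  induction t with
  | nil => intro d L k _; rfl
  | cons x xs ih =>
    intro d L k hnd
    obtain ⟨hx, hxs⟩ := List.nodup_cons.mp hnd
    rw [pvInsSeq, pvLookC, ih _ _ _ hxs]
    by_cases hk : k = x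
    · subst hk
      rw [if_pos rfl, pvLookC_of_not_mem _ _ _ _ hx]
      simp
    · rw [if_neg hk]
      rw [show (d.insert x L)[k]? = d[k]? from by
        simp [Std.HashMap.getElem?_insert, (Ne.symm hk)]]

lemma pvFold_range (t : List Int) : ∀ (d : Std.HashMap Int Int) (L : Int),
    (List.range t.length).foldl
      (fun d' k => d'.insert (t.getD k 0) (L - (k : Int))) d
      = pvInsSeq d t L := by
  induction t with
  | nil => intro d L; rfl
  | cons x xs ih =>
    intro d L
    rw [List.length_cons, List.range_succ_eq_map, List.foldl_cons, List.foldl_map, pvInsSeq]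
    have harg : (fun (d' : Std.HashMap Int Int) (k : Nat) =>
          d'.insert ((x :: xs).getD (Nat.succ k) 0) (L - ((Nat.succ k : Nat) : Int)))
        = fun d' k => d'.insert (xs.getD k 0) ((L - 1) - (k : Int)) := by
      funext d' k
      rw [List.getD_cons_succ]
      congr 1
      push_cast
      ring
    rw [show d.insert ((x :: xs).getD 0 0) (L - ((0 : Nat) : Int))
        = d.insert x L by rw [List.getD_cons_zero]; norm_num, harg, ih]

lemma pvBackfillA_eq (t : List Int) (d : Std.HashMap Int Int) (L : Int) :
    pvBackfillA d t L = pvInsSeq d t L := by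
  rw [pvBackfillA, PySem.List.pyRange_one,
    show (((t.length : Int)) - 0).toNat = t.length by simp, List.foldl_map]
  rw [show (fun (d' : Std.HashMap Int Int) (k : Nat) =>
        d'.insert (PySem.List.pyGetD t ((0 : Int) + (k : Int)) 0) (L - ((0 : Int) + (k : Int))))
      = fun d' k => d'.insert (t.getD k 0) (L - (k : Int)) from by
    funext d' k
    rw [zero_add, PySem.List.pyGetD_natCast]]
  exact pvFold_range t d L

lemma pvFoldA_none (l : List Int) : l.foldl pvStepLoopA none = none := by
  induction l with
  | nil => rfl
  | cons i rest ih => rw [List.foldl_cons]; exact ih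

lemma pvFoldB_none (l : List Int) : l.foldl pvStepLenB none = none := by
  induction l with
  | nil => rfl
  | cons i rest ih => rw [List.foldl_cons]; exact ih

-- the pure selection A's comparisons perform, over (index, length) pairs
def pvSel (ps : List (Int × Int)) (s : Int × Option Int) : Int × Option Int :=
  ps.foldl (fun s p => if s.1 < p.2 then (p.2, some p.1) else s) s

-- A's stateful fold against B's lengths fold: same divergence, and on success A's
-- (largest, target) is the pure selection over B's new lengths zipped with the indices
lemma pvFold_eq (l : List Int) : ∀ (largest : Int) (target : Option Int) (ls : List Int)
    (dA mB : Std.HashMap Int Int), dA[(1 : Int)]? = none → mB[(1 : Int)]? = some 0 →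
    (∀ k : Int, k ≠ 1 → dA[k]? = mB[k]?) →
    (l.foldl pvStepLoopA (some (largest, target, dA)) = none ∧
      l.foldl pvStepLenB (some (ls, mB)) = none) ∨
    (∃ s d1 new m2,
      l.foldl pvStepLoopA (some (largest, target, dA)) = some (s.1, s.2, d1) ∧
      l.foldl pvStepLenB (some (ls, mB)) = some (ls ++ new, m2) ∧
      s = pvSel (l.zip new) (largest, target) ∧ new.length = l.length) := by
  induction l with
  | nil =>
    intro largest target ls dA mB _ _ _
    exact Or.inr ⟨(largest, target), dA, [], mB, rfl, by simp, rfl, rfl⟩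
  | cons i rest ih =>
    intro largest target ls dA mB hA1 hB1 hk
    have hfun : (fun x : Int => dA[x]?) = (fun x : Int => if x = 1 then none else mB[x]?) := by
      funext x
      by_cases hx : x = 1
      · rw [hx, if_pos rfl, hA1]
      · rw [if_neg hx, hk x hx]
    rw [List.foldl_cons, List.foldl_cons, pvStepLoopA, pvStepLenB, pvWhileA_eq]
    cases hc : pvCref (fun x => dA[x]?) pvFuel i with
    | none =>
      rw [(pvChainB_spec pvFuel i mB hB1).1 (by rw [← hfun, hc])]
      exact Or.inl ⟨pvFoldA_none rest, pvFoldB_none rest⟩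
    | some p =>
      obtain ⟨m', hm', hm'1, hlook⟩ := (pvChainB_spec pvFuel i mB hB1).2 p.1 p.2
        (by rw [← hfun, hc])
      rw [hm']
      dsimp only
      simp only [Option.map_some, zero_add, List.nil_append]
      have hnd : p.2.Nodup := pvCref_nodup pvFuel i p.1 p.2 (fun x => dA[x]?) hc
      have hone : (1 : Int) ∉ p.2 := pvCref_one_not_mem pvFuel (fun x => dA[x]?) i p.1 p.2 hc
      have hd1 : (pvBackfillA dA p.2 p.1)[(1 : Int)]? = none := by
        rw [pvBackfillA_eq, pvInsSeq_get? _ _ _ _ hnd, pvLookC_of_not_mem _ _ _ _ hone, hA1]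
      have hdic : ∀ k : Int, k ≠ 1 → (pvBackfillA dA p.2 p.1)[k]? = m'[k]? := by
        intro k hk'
        rw [pvBackfillA_eq, pvInsSeq_get? _ _ _ _ hnd, hk k hk']
        exact (hlook k hk').symm
      by_cases hgt : largest < p.1
      · rw [if_pos hgt]
        rcases ih p.1 (some i) (ls ++ [p.1]) _ _ hd1 hm'1 hdic with ⟨hA, hB⟩ | ⟨s, d1, new, m2, hA, hB, hs, hlen⟩
        · exact Or.inl ⟨hA, hB⟩
        · refine Or.inr ⟨s, d1, p.1 :: new, m2, hA, by rw [hB]; simp, ?_, by simp [hlen]⟩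
          rw [hs, List.zip_cons_cons, pvSel, pvSel, List.foldl_cons, if_pos hgt]
      · rw [if_neg hgt]
        rcases ih largest target (ls ++ [p.1]) _ _ hd1 hm'1 hdic with ⟨hA, hB⟩ | ⟨s, d1, new, m2, hA, hB, hs, hlen⟩
        · exact Or.inl ⟨hA, hB⟩
        · refine Or.inr ⟨s, d1, p.1 :: new, m2, hA, by rw [hB]; simp, ?_, by simp [hlen]⟩
          rw [hs, List.zip_cons_cons, pvSel, pvSel, List.foldl_cons, if_neg hgt]

-- a memo hit returns immediately (any positive fuel)
lemma pvChainB_hit (f : Nat) (n v : Int) (m : Std.HashMap Int Int)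
    (hf : 0 < f) (hm : m[n]? = some v) : pvChainB f n m = some (v, m) := by
  obtain ⟨f', rfl⟩ : ∃ f', f = f' + 1 := ⟨f - 1, by omega⟩
  rw [pvChainB, hm]

-- the selection never updates once the accumulator dominates the rest
lemma pvSel_no_update (ps : List (Int × Int)) : ∀ (lg : Int) (tg : Option Int),
    (∀ p ∈ ps, p.2 ≤ lg) → pvSel ps (lg, tg) = (lg, tg) := by
  induction ps with
  | nil => intro lg tg _; rfl
  | cons p rest ih =>
    intro lg tg h
    rw [pvSel, List.foldl_cons, if_neg (by
      simp only [not_lt]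
      exact h p (List.mem_cons_self))]
    exact ih lg tg (fun q hq => h q (List.mem_cons_of_mem p hq))

-- consecutive indices paired with the lengths
def pvEnum (b : Int) : List Int → List (Int × Int)
  | [] => []
  | x :: xs => (b, x) :: pvEnum (b + 1) xs

lemma pvZip_enum (new : List Int) : ∀ (a : Int),
    (PySem.List.pyRange a (a + new.length) 1).zip new = pvEnum a new := by
  induction new with
  | nil => intro a; simp [pvEnum]
  | cons x rest ih =>
    intro a
    rw [PySem.List.pyRange_one_cons (by push_cast [List.length_cons]; omega), pvEnum,
      show a + ((x :: rest).length : Int) = (a + 1) + (rest.length : Int) from by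
        push_cast [List.length_cons]; ring,
      List.zip_cons_cons, ih (a + 1)]

lemma pvEnum_snd_mem (xs : List Int) : ∀ (b : Int) (p : Int × Int), p ∈ pvEnum b xs → p.2 ∈ xs := by
  induction xs with
  | nil => intro b p hp; simp [pvEnum] at hp
  | cons y ys ihy =>
    intro b p hp
    rw [pvEnum, List.mem_cons] at hp
    rcases hp with h | h
    · simp [h]
    · exact List.mem_cons_of_mem y (ihy (b + 1) p h)

-- the selection lands on the first maximum when the start value is beaten
lemma pvSel_hits (new : List Int) : ∀ (b lg : Int) (tg : Option Int) (mx : Int) (idx : Nat),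
    (∀ y ∈ new, y ≤ mx) → lg < mx → PySem.List.index? new mx = some idx →
    (pvSel (pvEnum b new) (lg, tg)).2 = some (b + idx) := by
  induction new with
  | nil =>
    intro b lg tg mx idx _ _ hidx
    rw [show PySem.List.index? ([] : List Int) mx = none from rfl] at hidx
    exact absurd hidx (by simp)
  | cons x rest ih =>
    intro b lg tg mx idx hmax hlg hidx
    rw [pvEnum, pvSel, List.foldl_cons]
    by_cases hx : x = mx
    · subst hx
      rw [PySem.List.index?_cons_self] at hidx
      obtain rfl : idx = 0 := by simpa using hidx.symm
      rw [if_pos hlg]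
      rw [show List.foldl (fun s p => if s.1 < p.2 then (p.2, some p.1) else s)
          (x, some b) (pvEnum (b + 1) rest) = pvSel (pvEnum (b + 1) rest) (x, some b) from rfl,
        pvSel_no_update _ x (some b) (fun p hp =>
          hmax p.2 (List.mem_cons_of_mem x (pvEnum_snd_mem rest (b + 1) p hp)))]
      norm_num
    · rw [PySem.List.index?_cons_of_ne _ (Ne.symm (fun h => hx h.symm))] at hidx
      obtain ⟨idx', hidx', rfl⟩ : ∃ idx', PySem.List.index? rest mx = some idx' ∧ idx = idx' + 1 := by
        cases h' : PySem.List.index? rest mx with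
        | none => rw [h'] at hidx; exact absurd hidx (by simp)
        | some j =>
          rw [h'] at hidx
          simp only [Option.map_some, Option.some_inj] at hidx
          exact ⟨j, rfl, hidx.symm⟩
      have hrest : ∀ y ∈ rest, y ≤ mx := fun y hy => hmax y (List.mem_cons_of_mem x hy)
      have hxlt : x < mx := lt_of_le_of_ne (hmax x List.mem_cons_self) hx
      have hcast : b + ((idx' : Int) + 1) = (b + 1) + (idx' : Int) := by ring
      by_cases hb : lg < x
      · rw [if_pos hb,
          show List.foldl (fun s p => if s.1 < p.2 then (p.2, some p.1) else s)
            (x, some b) (pvEnum (b + 1) rest) = pvSel (pvEnum (b + 1) rest) (x, some b) from rfl,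
          ih (b + 1) x (some b) mx idx' hrest hxlt hidx']
        congr 1
        push_cast
        ring
      · rw [if_neg hb,
          show List.foldl (fun s p => if s.1 < p.2 then (p.2, some p.1) else s)
            (lg, tg) (pvEnum (b + 1) rest) = pvSel (pvEnum (b + 1) rest) (lg, tg) from rfl,
          ih (b + 1) lg tg mx idx' hrest hlg hidx']
        congr 1
        push_cast
        ring

-- B's lengths fold only ever appends to the accumulated list
lemma pvFoldB_shift (l : List Int) : ∀ (ls : List Int) (m : Std.HashMap Int Int),
    l.foldl pvStepLenB (some (ls, m)) = none ∨
    ∃ suf m', l.foldl pvStepLenB (some (ls, m)) = some (ls ++ suf, m') := by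
  induction l with
  | nil => intro ls m; exact Or.inr ⟨[], m, by simp⟩
  | cons i rest ih =>
    intro ls m
    rw [List.foldl_cons, pvStepLenB]
    cases hc : pvChainB pvFuel i m with
    | none => exact Or.inl (pvFoldB_none rest)
    | some q =>
      rcases ih (ls ++ [q.1]) q.2 with h | ⟨suf, m', h⟩
      · exact Or.inl h
      · exact Or.inr ⟨q.1 :: suf, m', by rw [h]; simp⟩

-- the concrete first two iterations of B's fold: lengths 0 and 1
lemma pvChainB_one : pvChainB pvFuel 1 ((∅ : Std.HashMap Int Int).insert 1 0) = some (0, (∅ : Std.HashMap Int Int).insert 1 0) :=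
  pvChainB_hit pvFuel 1 0 _ (by norm_num [pvFuel]) (by simp)

lemma pvChainB_two : pvChainB pvFuel 2 ((∅ : Std.HashMap Int Int).insert 1 0)
    = some (1, ((∅ : Std.HashMap Int Int).insert 1 0).insert 2 1) := by
  rw [show pvFuel = (2 ^ 64 - 1) + 1 from by norm_num [pvFuel], pvChainB]
  rw [show (((∅ : Std.HashMap Int Int).insert 1 0)[(2 : Int)]?) = none from by
    simp]
  rw [show (if PySem.Int.mod 2 2 ≠ 0 then 3 * 2 + 1 else PySem.Int.floordiv 2 2) = (1 : Int) from by decide]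
  rw [pvChainB_hit (2 ^ 64 - 1) 1 0 _ (by norm_num) (by simp)]
  norm_num

-- ===== VERDICT (by name: the statement is the Claim_ definition above) =====
theorem largest_chain_dyn_spec : Claim_equal_largest_chain_dyn := by
  intro threshold _ hpre
  unfold Pre_largest_chain_dyn at hpre
  unfold Spec_largest_chain_dyn largest_chain_dyn largest_chain_dyn_alt
  have hrange : PySem.List.pyRange 1 threshold 1
      = 1 :: 2 :: PySem.List.pyRange 3 threshold 1 := by
    rw [PySem.List.pyRange_one_cons (by omega : (1:Int) < threshold),
      PySem.List.pyRange_one_cons (by omega : (1:Int) + 1 < threshold)]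
    norm_num
  rcases pvFold_eq (PySem.List.pyRange 1 threshold 1) 0 none []
      (∅ : Std.HashMap Int Int) ((∅ : Std.HashMap Int Int).insert 1 0)
      (by simp) (by simp)
      (fun k hk => by simp [Ne.symm hk]) with
    ⟨hA, hB⟩ | ⟨s, d1, new, m2, hA, hB, hs, hlen⟩
  · rw [hA, hB]
    rfl
  · rw [hA, hB]
    simp only [List.nil_append] at hB ⊢
    -- new starts with [0, 1]
    have hBconc : (PySem.List.pyRange 1 threshold 1).foldl pvStepLenB
        (some ([], (∅ : Std.HashMap Int Int).insert 1 0))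
        = (PySem.List.pyRange 3 threshold 1).foldl pvStepLenB
          (some ([0, 1], ((∅ : Std.HashMap Int Int).insert 1 0).insert 2 1)) := by
      rw [hrange, List.foldl_cons, List.foldl_cons, pvStepLenB, pvChainB_one]
      dsimp only
      rw [show ([] : List Int) ++ [0] = [0] from rfl, pvStepLenB, pvChainB_two]
      rfl
    obtain ⟨suf, m', hsuf⟩ :
        ∃ suf m', (PySem.List.pyRange 1 threshold 1).foldl pvStepLenB
          (some ([], (∅ : Std.HashMap Int Int).insert 1 0)) = some ([0, 1] ++ suf, m') := by
      rcases pvFoldB_shift (PySem.List.pyRange 3 threshold 1) [0, 1]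
          (((∅ : Std.HashMap Int Int).insert 1 0).insert 2 1) with h | ⟨suf, m', h⟩
      · rw [hBconc, h] at hB; exact absurd hB (by simp)
      · exact ⟨suf, m', by rw [hBconc, h]⟩
    rw [hB] at hsuf
    obtain ⟨hnew, -⟩ : new = [0, 1] ++ suf ∧ m2 = m' := by
      simpa using hsuf
    have hmem1 : (1 : Int) ∈ new := by rw [hnew]; simp
    cases hmx : PySem.List.max? new (fun y => y) with
    | none =>
      rw [PySem.List.max?_eq_none_iff] at hmx
      rw [hmx] at hmem1
      exact absurd hmem1 (by simp)
    | some mx =>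
      have hmax : ∀ y ∈ new, y ≤ mx := fun y hy => PySem.List.max?_isMax hmx y hy
      have hmxpos : (0 : Int) < mx := lt_of_lt_of_le (by norm_num) (hmax 1 hmem1)
      obtain ⟨idx, hidx⟩ : ∃ idx, PySem.List.index? new mx = some idx := by
        have := (PySem.List.index?_isSome_iff new mx).mpr (PySem.List.max?_mem hmx)
        exact Option.isSome_iff_exists.mp this
      have hzip : (PySem.List.pyRange 1 threshold 1).zip new = pvEnum 1 new := by
        rw [show threshold = 1 + (new.length : Int) from by
          rw [hlen, PySem.List.length_pyRange_one]; omega]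
        exact pvZip_enum new 1
      rw [hs, hzip, pvSel_hits new 1 0 none mx idx hmax hmxpos hidx]
      rw [PySem.List.index?_eq_idxOf?] at hidx
      simp [hidx]
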